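-- pv_equiv track=rewrite | github.com/nazihkalo/basepaint_timelapse | basepaint_timelapse/utils.py | decode_blob
-- ===== SOURCE A (Python) =====
-- def decode_blob(hex_blob):
--     # Convert the hex to binary, skipping the '0b' prefix
--     bin_blob = bin(hex_blob)[2:]
--
--     # Ensure the binary blob is a multiple of 24 by padding with zeros if necessary
--     while len(bin_blob) % 24 != 0:
--         bin_blob = '0' + bin_blob
--
--     # Split the binary blob into 24-bit chunks
--     chunks = [bin_blob[i:i+24] for i in range(0, len(bin_blob), 24)]
--
--     decoded_data = []
--     for chunk in chunks:
--         x = int(chunk[:8], 2)   # First 8 bits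
--         y = int(chunk[8:16], 2)  # Next 8 bits
--         color_index = int(chunk[16:], 2)  # Last 8 bits
--         decoded_data.append((x, y, color_index))
--
--     return decoded_data
-- ===== SOURCE B (Python) =====
-- def decode_blob(hex_blob):
--     # One 24-bit chunk per 24 bits (at least one, so 0 -> [(0, 0, 0)]),
--     # extracted by shift-and-mask instead of binary-string slicing.
--     n = (max(hex_blob.bit_length(), 1) + 23) // 24
--     decoded_data = []
--     for i in range(n):
--         v = (hex_blob >> (24 * (n - 1 - i))) & 0xFFFFFF
--         decoded_data.append((v >> 16, (v >> 8) & 0xFF, v & 0xFF))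
--     return decoded_data
-- ===== Notes on version B (the rewrite author's own statement) =====
-- stated objective: idiomatic
-- what changed: Replaces the binary-string conversion, while-loop zero padding and string slicing with direct shift-and-mask arithmetic on the integer: the number of 24-bit chunks is computed from bit_length and each (x, y, color) triple is extracted with >> and &.
-- outside the precondition, e.g. on decode_blob(-5): A raises ValueError, B returns [(255, 255, 251)]; on decode_blob(-9586): A returns [(0, 37, 114)], B returns [(255, 218, 142)]
import Mathlib
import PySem

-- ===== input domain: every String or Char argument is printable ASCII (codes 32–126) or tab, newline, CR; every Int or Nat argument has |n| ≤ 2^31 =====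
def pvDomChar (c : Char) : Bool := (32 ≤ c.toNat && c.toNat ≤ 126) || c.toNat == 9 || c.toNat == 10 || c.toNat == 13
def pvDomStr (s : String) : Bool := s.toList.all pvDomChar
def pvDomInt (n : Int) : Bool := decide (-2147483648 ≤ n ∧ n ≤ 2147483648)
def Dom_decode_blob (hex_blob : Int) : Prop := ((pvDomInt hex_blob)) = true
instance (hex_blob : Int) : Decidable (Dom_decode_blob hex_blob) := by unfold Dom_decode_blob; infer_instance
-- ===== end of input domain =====

-- B replaces A's binary-string building/padding/slicing with shift-and-mask integer
-- arithmetic over the same 24-bit chunks (objective: idiomatic; same asymptotic cost).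


-- ===== PORT A =====
-- int(chunk, 2), ported by hand as a digit fold; exact wherever every character of the
-- chunk is a binary digit '0'/'1' — which holds for every chunk A builds when
-- hex_blob ≥ 0 (Pre_). For hex_blob < 0 Python's int() raises ValueError instead
-- (the chunk then contains '-'/'b'); those inputs are excluded by Pre_decode_blob.
def pvParseBin (cs : List Char) : Int :=
  cs.foldl (fun a c => a * 2 + ((c.toNat - 48 : Nat) : Int)) 0

-- the `while len(bin_blob) % 24 != 0: bin_blob = '0' + bin_blob` loop
def pvPadLoop (bs : List Char) : List Char :=
  if bs.length % 24 ≠ 0 then pvPadLoop ('0' :: bs) else bs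
termination_by (24 - bs.length % 24) % 24
decreasing_by simp at *; omega

def decode_blob (hex_blob : Int) : List (Int × Int × Int) :=
  -- bin_blob = bin(hex_blob)[2:]
  let binBlob := PySem.List.slice (PySem.Int.toBinChars0b hex_blob) (some 2) none
  let padded := pvPadLoop binBlob
  -- chunks = [bin_blob[i:i+24] for i in range(0, len(bin_blob), 24)]
  let chunks := (PySem.List.pyRange 0 (padded.length : Int) 24).map
      (fun i => PySem.List.slice padded (some i) (some (i + 24)))
  chunks.foldl (fun acc chunk =>
    acc ++ [(pvParseBin (PySem.List.slice chunk none (some 8)),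
             pvParseBin (PySem.List.slice chunk (some 8) (some 16)),
             pvParseBin (PySem.List.slice chunk (some 16) none))]) []

-- ===== PORT B =====
def decode_blob_alt (hex_blob : Int) : List (Int × Int × Int) :=
  let n := (max (PySem.Int.bitLength hex_blob) 1 + 23) / 24
  (List.range n).map (fun i =>
    let v := PySem.Int.band (hex_blob >>> (24 * (n - 1 - i))) 16777215
    (v >>> (16 : Nat), PySem.Int.band (v >>> (8 : Nat)) 255, PySem.Int.band v 255))

-- ===== PRECONDITION & SPEC =====
-- Pre_ excludes hex_blob < 0: there bin() yields '-0b…', so int(chunk, 2) usually raises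
-- ValueError on the leftover '-'/'b' characters, and when the 'b' happens to align as a
-- '0b' slice prefix A instead returns an accidental misparse of the sign/prefix characters;
-- B returns Python's masked two's-complement chunks there.
def Pre_decode_blob (hex_blob : Int) : Prop := 0 ≤ hex_blob
instance (hex_blob : Int) : Decidable (Pre_decode_blob hex_blob) := by unfold Pre_decode_blob; infer_instance
def pvWitness_decode_blob : Int := 16909060

def Spec_decode_blob (hex_blob : Int) (out : List (Int × Int × Int)) : Prop := out = decode_blob_alt hex_blob
instance (hex_blob : Int) (out : List (Int × Int × Int)) : Decidable (Spec_decode_blob hex_blob out) := by unfold Spec_decode_blob; infer_instance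

-- ===== CLAIM (what is proved, stated in full; the proofs are below) =====
def Claim_equal_decode_blob : Prop := ∀ (hex_blob : Int), Dom_decode_blob hex_blob → Pre_decode_blob hex_blob → Spec_decode_blob hex_blob (decode_blob hex_blob)

-- ===== LEMMAS AND PROOFS =====

-- reference binary rendering: pvR n = the digits bin(n)[2:] (n ≥ 0)
def pvR (n : Nat) : List Char :=
  if n < 2 then [Nat.digitChar n] else pvR (n / 2) ++ [Nat.digitChar (n % 2)]
termination_by n
decreasing_by omega

-- Nat-valued binary parse; pvParseBin is its cast
def pvParseN (cs : List Char) : Nat := cs.foldl (fun a c => a * 2 + (c.toNat - 48)) 0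

def pvBin01 (cs : List Char) : Prop := ∀ c ∈ cs, c = '0' ∨ c = '1'

theorem pvParseN_shift (cs : List Char) : ∀ a : Nat,
    cs.foldl (fun a c => a * 2 + (c.toNat - 48)) a = a * 2 ^ cs.length + pvParseN cs := by
  induction cs with
  | nil => intro a; simp [pvParseN]
  | cons c t ih =>
      intro a
      simp only [List.foldl_cons, List.length_cons, pvParseN] at *
      rw [ih, ih (0 * 2 + (c.toNat - 48))]
      ring

theorem pvParseBin_eq (cs : List Char) : pvParseBin cs = (pvParseN cs : Int) := by
  have h : ∀ (l : List Char) (a : Nat),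
      l.foldl (fun x c => x * 2 + ((c.toNat - 48 : Nat) : Int)) (a : Int)
        = ((l.foldl (fun x c => x * 2 + (c.toNat - 48)) a : Nat) : Int) := by
    intro l
    induction l with
    | nil => intro a; simp
    | cons c t ih =>
        intro a
        simp only [List.foldl_cons]
        have : ((a : Int) * 2 + ((c.toNat - 48 : Nat) : Int)) = ((a * 2 + (c.toNat - 48) : Nat) : Int) := by
          push_cast; ring
        rw [this, ih]
  simpa [pvParseBin, pvParseN] using h cs 0

theorem pvParseN_lt (cs : List Char) (h : pvBin01 cs) : pvParseN cs < 2 ^ cs.length := by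
  induction cs with
  | nil => simp [pvParseN]
  | cons c t ih =>
      have hc : c = '0' ∨ c = '1' := h c (List.mem_cons_self)
      have ht : pvBin01 t := fun x hx => h x (List.mem_cons_of_mem _ hx)
      have hd : c.toNat - 48 ≤ 1 := by rcases hc with h | h <;> simp [h]
      have hP : pvParseN t < 2 ^ t.length := ih ht
      show pvParseN (c :: t) < 2 ^ (c :: t).length
      have hP2 : pvParseN (c :: t) = (0 * 2 + (c.toNat - 48)) * 2 ^ t.length + pvParseN t := by
        simp only [pvParseN, List.foldl_cons]
        rw [pvParseN_shift]
        rfl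
      have h3 : (0 * 2 + (c.toNat - 48)) * 2 ^ t.length ≤ 1 * 2 ^ t.length :=
        Nat.mul_le_mul_right _ (by omega)
      rw [hP2, List.length_cons, pow_succ]
      simp only [one_mul] at h3
      omega

theorem pvParseN_append (xs ys : List Char) :
    pvParseN (xs ++ ys) = pvParseN xs * 2 ^ ys.length + pvParseN ys := by
  simp only [pvParseN, List.foldl_append]
  rw [pvParseN_shift ys]
  rfl

theorem pvParseN_take_drop (cs : List Char) (h : pvBin01 cs) (k : Nat) :
    pvParseN (cs.take k) = pvParseN cs / 2 ^ (cs.length - k) ∧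
    pvParseN (cs.drop k) = pvParseN cs % 2 ^ (cs.length - k) := by
  have hsplit : cs = cs.take k ++ cs.drop k := (List.take_append_drop k cs).symm
  have hlen : (cs.drop k).length = cs.length - k := List.length_drop
  have hdrop01 : pvBin01 (cs.drop k) := fun x hx => h x (List.mem_of_mem_drop hx)
  have hlt : pvParseN (cs.drop k) < 2 ^ (cs.length - k) := by
    have := pvParseN_lt (cs.drop k) hdrop01
    rwa [hlen] at this
  have hval : pvParseN cs = 2 ^ (cs.length - k) * pvParseN (cs.take k) + pvParseN (cs.drop k) := by
    conv_lhs => rw [hsplit]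
    rw [pvParseN_append, hlen]
    ring
  constructor
  · rw [hval, Nat.mul_add_div (by positivity), Nat.div_eq_of_lt hlt]
    omega
  · rw [hval, Nat.mul_add_mod, Nat.mod_eq_of_lt hlt]

theorem pvR_bin01 (n : Nat) : pvBin01 (pvR n) := by
  induction n using Nat.strong_induction_on with
  | _ n ih =>
      rw [pvR]
      by_cases h : n < 2
      · interval_cases n <;> simp [pvBin01] <;> decide
      · simp only [h, if_false]
        intro c hc
        rcases List.mem_append.mp hc with hc | hc
        · exact ih (n / 2) (by omega) c hc
        · have hm : n % 2 = 0 ∨ n % 2 = 1 := by omega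
          rcases hm with h2 | h2 <;> rw [h2] at hc <;> simp at hc <;> subst hc <;> decide

theorem pvR_parse (n : Nat) : pvParseN (pvR n) = n := by
  induction n using Nat.strong_induction_on with
  | _ n ih =>
      rw [pvR]
      by_cases h : n < 2
      · interval_cases n <;> decide
      · simp only [h, if_false]
        rw [pvParseN_append, ih (n / 2) (by omega)]
        have hm : n % 2 = 0 ∨ n % 2 = 1 := by omega
        have hd : pvParseN [(n % 2).digitChar] = n % 2 := by
          rcases hm with h2 | h2 <;> rw [h2] <;> decide
        rw [hd]
        simp only [List.length_singleton, pow_one]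
        omega

theorem pvR_length_pos (n : Nat) : 1 ≤ (pvR n).length := by
  rw [pvR]
  by_cases h : n < 2 <;> simp [h]

theorem pvR_length (n : Nat) (hn : 0 < n) :
    (pvR n).length = PySem.Int.bitLength (n : Int) := by
  induction n using Nat.strong_induction_on with
  | _ n ih =>
      rw [pvR]
      by_cases h : n < 2
      · have : n = 1 := by omega
        subst this; decide
      · simp only [h, if_false, List.length_append, List.length_singleton]
        rw [ih (n / 2) (by omega) (by omega), ← PySem.Int.bitLength_natCast (by omega)]

theorem pvToDigitsCore_eq : ∀ (f n : Nat) (acc : List Char), n < f →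
    Nat.toDigitsCore 2 f n acc = pvR n ++ acc := by
  intro f
  induction f with
  | zero => intro n acc h; omega
  | succ f ih =>
      intro n acc h
      rw [Nat.toDigitsCore]
      by_cases h2 : n / 2 = 0
      · rw [if_pos h2]
        conv_rhs => rw [pvR]
        rw [if_pos (by omega : n < 2)]
        have hm : n % 2 = n := by omega
        rw [hm]
        rfl
      · rw [if_neg h2, ih (n / 2) _ (by omega)]
        conv_rhs => rw [pvR]
        rw [if_neg (by omega : ¬ n < 2), List.append_assoc]
        rfl

theorem pvToDigits_two (n : Nat) : Nat.toDigits 2 n = pvR n := by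
  rw [Nat.toDigits, pvToDigitsCore_eq (n + 1) n [] (by omega), List.append_nil]

theorem pvPadLoop_eq : ∀ (k : Nat) (bs : List Char), (24 - bs.length % 24) % 24 = k →
    pvPadLoop bs = List.replicate k '0' ++ bs := by
  intro k
  induction k with
  | zero =>
      intro bs h
      rw [pvPadLoop]
      have : bs.length % 24 = 0 := by omega
      simp [this]
  | succ k ih =>
      intro bs h
      have hne : bs.length % 24 ≠ 0 := by omega
      rw [pvPadLoop, if_pos (by simpa using hne)]
      rw [ih ('0' :: bs) (by simp; omega)]
      simp [List.replicate_succ']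

theorem pvParseN_replicate_zero (p : Nat) (cs : List Char) :
    pvParseN (List.replicate p '0' ++ cs) = pvParseN cs := by
  rw [pvParseN_append]
  have : pvParseN (List.replicate p '0') = 0 := by
    induction p with
    | zero => rfl
    | succ p ih =>
        rw [List.replicate_succ', pvParseN_append, ih]
        have h0 : pvParseN ['0'] = 0 := by decide
        simp [h0]
  simp [this]

theorem pvR_zero : pvR 0 = ['0'] := by rw [pvR]; decide

theorem pvBin01_padded (p : Nat) (n : Nat) : pvBin01 (List.replicate p '0' ++ pvR n) := by
  intro c hc
  rcases List.mem_append.mp hc with hc | hc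
  · left; exact (List.eq_of_mem_replicate hc)
  · exact pvR_bin01 n c hc

-- shift/mask helpers used to evaluate B's arithmetic on a nonnegative value
theorem pvShift (m k : Nat) : ((m : Int) >>> k) = ((m / 2 ^ k : Nat) : Int) := by
  rw [← Int.natCast_shiftRight, Nat.shiftRight_eq_div_pow]

theorem pvBand24 (m : Nat) : PySem.Int.band (m : Int) 16777215 = ((m % 16777216 : Nat) : Int) := by
  rw [PySem.Int.band_of_nonneg (by positivity) (by norm_num), Int.toNat_natCast,
      show ((16777215 : Int)).toNat = 16777215 from rfl]
  have h : m &&& 16777215 = m % 16777216 := by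
    have h2 := Nat.and_two_pow_sub_one_eq_mod m 24
    norm_num at h2
    exact h2
  rw [h]

theorem pvBand8 (m : Nat) : PySem.Int.band (m : Int) 255 = ((m % 256 : Nat) : Int) := by
  rw [PySem.Int.band_of_nonneg (by positivity) (by norm_num), Int.toNat_natCast,
      show ((255 : Int)).toNat = 255 from rfl]
  have h : m &&& 255 = m % 256 := by
    have h2 := Nat.and_two_pow_sub_one_eq_mod m 8
    norm_num at h2
    exact h2
  rw [h]

-- the triple A computes from one 24-character binary chunk, as arithmetic on its value
theorem pvChunkTriple (cs : List Char) (h01 : pvBin01 cs) (hlen : cs.length = 24) :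
    (pvParseBin (PySem.List.slice cs none (some 8)),
     pvParseBin (PySem.List.slice cs (some 8) (some 16)),
     pvParseBin (PySem.List.slice cs (some 16) none))
    = (((pvParseN cs / 65536 : Nat) : Int),
       (((pvParseN cs % 65536) / 256 : Nat) : Int),
       ((pvParseN cs % 256 : Nat) : Int)) := by
  have h8 := (pvParseN_take_drop cs h01 8).1
  have hd8 := (pvParseN_take_drop cs h01 8).2
  have h16 := (pvParseN_take_drop cs h01 16).2
  rw [hlen] at h8 hd8 h16
  norm_num at h8 hd8 h16
  have hds01 : pvBin01 (cs.drop 8) := fun x hx => h01 x (List.mem_of_mem_drop hx)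
  have hy := (pvParseN_take_drop (cs.drop 8) hds01 8).1
  have hdlen : (cs.drop 8).length = 16 := by rw [List.length_drop, hlen]
  rw [hdlen] at hy
  norm_num at hy
  rw [PySem.List.slice_to cs (b := 8) (by norm_num),
      PySem.List.slice_toNat cs (a := 8) (b := 16) (by norm_num) (by norm_num),
      PySem.List.slice_from cs (a := 16) (by norm_num)]
  simp only [show ((8 : Int)).toNat = 8 from rfl, show ((16 : Int)).toNat = 16 from rfl]
  norm_num
  refine ⟨?_, ?_, ?_⟩
  · rw [pvParseBin_eq, h8]; omega
  · rw [pvParseBin_eq, hy, hd8]; omega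
  · rw [pvParseBin_eq, h16]; omega

-- ===== VERDICT (by name: the statement is the Claim_ definition above) =====
theorem decode_blob_spec : Claim_equal_decode_blob := by
  intro x hdom hpre
  unfold Spec_decode_blob
  unfold Pre_decode_blob at hpre
  lift x to ℕ using hpre with N
  unfold Dom_decode_blob pvDomInt at hdom
  have hN : N ≤ 2147483648 := by
    have h := of_decide_eq_true hdom
    exact_mod_cast h.2
  -- shared facts about the binary rendering
  have h01 := pvR_bin01 N
  have hL1 : 1 ≤ (pvR N).length := pvR_length_pos N
  have hLb : max (PySem.Int.bitLength (N : Int)) 1 = (pvR N).length := by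
    rcases Nat.eq_zero_or_pos N with h0 | h0
    · subst h0; rw [pvR_zero]; simp
    · rw [← pvR_length N h0]
      have : 1 ≤ PySem.Int.bitLength (N : Int) := by rw [pvR_length N h0] at hL1; omega
      omega
  have hL32 : (pvR N).length ≤ 32 := by
    rcases Nat.eq_zero_or_pos N with h0 | h0
    · subst h0; rw [pvR_zero]; simp
    · rw [pvR_length N h0]
      by_contra hcon
      have h1 : 2 ^ (32 : Nat) ≤ 2 ^ (PySem.Int.bitLength (N : Int) - 1) :=
        Nat.pow_le_pow_right (by norm_num) (by omega)
      have h2 := PySem.Int.two_pow_bitLength_le (N : Int) (by exact_mod_cast h0.ne')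
      simp only [Int.natAbs_natCast] at h2
      have h3 : (2 : Nat) ^ (32 : Nat) = 4294967296 := by norm_num
      omega
  have hNlt : N < 2 ^ (pvR N).length := by
    rcases Nat.eq_zero_or_pos N with h0 | h0
    · subst h0; rw [pvR_zero]; norm_num
    · rw [pvR_length N h0]
      have := PySem.Int.lt_two_pow_bitLength (N : Int)
      simpa using this
  -- unfold A's string pipeline: bin(hex_blob)[2:] is the digit list pvR N
  have hneg : ¬ ((N : Int) < 0) := by omega
  simp only [decode_blob, decode_blob_alt, PySem.Int.toBinChars0b, if_neg hneg,
    Int.toNat_natCast, pvToDigits_two]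
  rw [PySem.List.slice_from _ (a := 2) (by norm_num)]
  simp only [show ((2 : Int)).toNat = 2 from rfl, List.drop_succ_cons, List.drop_zero]
  rw [pvPadLoop_eq ((24 - (pvR N).length % 24) % 24) _ rfl, hLb]
  set p := (24 - (pvR N).length % 24) % 24 with hp
  set L := (pvR N).length with hLd
  have hlenpad : (List.replicate p '0' ++ pvR N).length = p + L := by
    simp only [List.length_append, List.length_replicate]
    omega
  have hpad01 := pvBin01_padded p N
  have hpadval : pvParseN (List.replicate p '0' ++ pvR N) = N := by
    rw [pvParseN_replicate_zero, pvR_parse]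
  rw [hlenpad]
  by_cases hc : L ≤ 24
  case pos =>
    -- one 24-bit chunk
    have hT : p + L = 24 := by omega
    have hNsmall : N < 16777216 := by
      have hmono : (2 : Nat) ^ L ≤ 2 ^ (24 : Nat) := Nat.pow_le_pow_right (by norm_num) hc
      have h24 : (2 : Nat) ^ (24 : Nat) = 16777216 := by norm_num
      omega
    have hn1 : (L + 23) / 24 = 1 := by omega
    rw [hT, hn1]
    have hrange : PySem.List.pyRange 0 ((24 : Nat) : Int) 24 = [0] := by decide
    rw [hrange]
    simp only [List.map_cons, List.map_nil, List.foldl_cons, List.foldl_nil, List.nil_append,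
      List.range_one]
    have hslice : PySem.List.slice (List.replicate p '0' ++ pvR N) (some 0) (some (0 + 24))
        = List.replicate p '0' ++ pvR N := by
      rw [zero_add, PySem.List.slice_toNat _ (a := 0) (b := 24) (by norm_num) (by norm_num)]
      simp only [show ((24 : Int)).toNat = 24 from rfl, Int.toNat_zero, List.drop_zero,
        Nat.sub_zero]
      exact List.take_of_length_le (by omega)
    rw [hslice, pvChunkTriple _ hpad01 (by omega), hpadval]
    -- B side: single chunk, i = 0, shift by 24*(1-1-0) = 0
    simp only [pvShift, pvBand24, pvBand8]
    norm_num
    omega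
  case neg =>
    -- two 24-bit chunks
    have hT : p + L = 48 := by omega
    have hn2 : (L + 23) / 24 = 2 := by omega
    rw [hT, hn2]
    have hrange : PySem.List.pyRange 0 ((48 : Nat) : Int) 24 = [0, 24] := by decide
    rw [hrange]
    simp only [List.map_cons, List.map_nil, List.foldl_cons, List.foldl_nil, List.nil_append,
      List.range_succ, List.map_append, List.singleton_append]
    have hslice0 : PySem.List.slice (List.replicate p '0' ++ pvR N) (some 0) (some (0 + 24))
        = (List.replicate p '0' ++ pvR N).take 24 := by
      rw [zero_add, PySem.List.slice_toNat _ (a := 0) (b := 24) (by norm_num) (by norm_num)]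
      simp only [show ((24 : Int)).toNat = 24 from rfl, Int.toNat_zero, List.drop_zero,
        Nat.sub_zero]
    have hslice1 : PySem.List.slice (List.replicate p '0' ++ pvR N) (some 24) (some (24 + 24))
        = (List.replicate p '0' ++ pvR N).drop 24 := by
      rw [show ((24 : Int) + 24) = 48 by norm_num,
          PySem.List.slice_toNat _ (a := 24) (b := 48) (by norm_num) (by norm_num)]
      simp only [show ((24 : Int)).toNat = 24 from rfl, show ((48 : Int)).toNat = 48 from rfl]
      exact List.take_of_length_le (by rw [List.length_drop]; omega)
    have hc0len : ((List.replicate p '0' ++ pvR N).take 24).length = 24 := by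
      rw [List.length_take]; omega
    have hc1len : ((List.replicate p '0' ++ pvR N).drop 24).length = 24 := by
      rw [List.length_drop]; omega
    have hc001 : pvBin01 ((List.replicate p '0' ++ pvR N).take 24) :=
      fun c hcm => hpad01 c (List.mem_of_mem_take hcm)
    have hc101 : pvBin01 ((List.replicate p '0' ++ pvR N).drop 24) :=
      fun c hcm => hpad01 c (List.mem_of_mem_drop hcm)
    have hv0 : pvParseN ((List.replicate p '0' ++ pvR N).take 24) = N / 16777216 := by
      have h := (pvParseN_take_drop _ hpad01 24).1
      rw [hlenpad, hT, hpadval] at h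
      norm_num at h
      exact h
    have hv1 : pvParseN ((List.replicate p '0' ++ pvR N).drop 24) = N % 16777216 := by
      have h := (pvParseN_take_drop _ hpad01 24).2
      rw [hlenpad, hT, hpadval] at h
      norm_num at h
      exact h
    rw [hslice0, hslice1, pvChunkTriple _ hc001 hc0len, pvChunkTriple _ hc101 hc1len, hv0, hv1]
    -- B side: chunks i = 0 (shift 24) and i = 1 (shift 0)
    simp only [pvShift, pvBand24, pvBand8]
    norm_num
    omega
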